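-- pv_equiv track=rewrite | github.com/la-strole/MITx-6.00x_sept_oct_2020 | 6.00.2x/unit1/ex1.py | brute_triple
-- ===== SOURCE A (Python) =====
-- def to_ternary(n):
--     if n < 3:
--         return str(n)
--     else:
--         return to_ternary(n//3) + str(n % 3)
--
-- def brute_triple(items):
--     for dec_num in range(3**len(items)):
--         mask = ('{:>0' + f'{len(items)}'+'}').format(to_ternary(dec_num))
--         bag1 = []
--         bag2 = []
--         for value in range(len(items)):
--             if mask[value] == '0':
--                 bag1.append(items[value])
--             elif mask[value] == '1':
--                 bag2.append(items[value])
--         yield bag1, bag2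
--
-- items = [str(x) for x in range(3)]
-- ===== SOURCE B (Python) =====
-- def brute_triple(items):
--     # Recursive enumeration: assign items[0] to bag1/bag2/discard (in that
--     # order, most-significant first), then recurse on the rest.
--     if not items:
--         yield [], []
--         return
--     first, rest = items[0], list(items[1:])
--     for choice in range(3):
--         for bag1, bag2 in brute_triple(rest):
--             if choice == 0:
--                 yield [first] + bag1, bag2
--             elif choice == 1:
--                 yield bag1, [first] + bag2
--             else:
--                 yield bag1, bag2
-- ===== Notes on version B (the rewrite author's own statement) =====
-- stated objective: simpler
-- what changed: B replaces A's enumerate-integers-then-decode-into-a-zero-padded-ternary-string-and-index scheme by a direct recursion: assign the first item to bag1/bag2/discard and recurse on the rest, which produces the same lexicographic order.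
import Mathlib
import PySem

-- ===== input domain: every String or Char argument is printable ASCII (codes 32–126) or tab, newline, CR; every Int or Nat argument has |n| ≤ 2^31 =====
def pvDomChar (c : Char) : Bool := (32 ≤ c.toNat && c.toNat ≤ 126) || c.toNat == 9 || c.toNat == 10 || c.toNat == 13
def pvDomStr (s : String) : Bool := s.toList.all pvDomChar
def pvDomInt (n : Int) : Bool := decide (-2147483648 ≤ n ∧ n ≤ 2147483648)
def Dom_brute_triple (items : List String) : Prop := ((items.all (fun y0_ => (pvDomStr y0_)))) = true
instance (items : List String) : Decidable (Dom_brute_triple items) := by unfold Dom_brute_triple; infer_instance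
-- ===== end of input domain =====

-- B replaces A's decode-an-integer-into-a-padded-ternary-string enumeration by a direct
-- recursion over the items (objective: simpler; same asymptotic output cost).

-- ===== PORT A =====
-- Python strings are ported as List Char (PySem.Chars convention); str concat is List append.
def to_ternary (n : Int) : List Char :=
  if n < 3 then PySem.Int.toChars n
  else to_ternary (PySem.Int.floordiv n 3) ++ PySem.Int.toChars (PySem.Int.mod n 3)
termination_by n.toNat
decreasing_by
  rw [PySem.Int.floordiv_eq_ediv_of_pos (by norm_num)]
  omega

-- '{:>0N}'.format(s): left-pad s with '0' to width N (no change when len s ≥ N) — exact.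
-- mask[value]/items[value] are always in range here, so pyGetD with a junk default is exact.
def brute_triple (items : List String) : List (List String × List String) :=
  (PySem.List.pyRange 0 (3 ^ items.length) 1).map (fun dec_num =>
    let tern := to_ternary dec_num
    let mask : List Char := List.replicate (items.length - tern.length) '0' ++ tern
    (PySem.List.pyRange 0 (items.length : Int) 1).foldl
      (fun (b : List String × List String) value =>
        if PySem.List.pyGetD mask value ' ' = '0' then
          (b.1 ++ [PySem.List.pyGetD items value ""], b.2)
        else if PySem.List.pyGetD mask value ' ' = '1' then
          (b.1, b.2 ++ [PySem.List.pyGetD items value ""])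
        else b)
      ([], []))

-- ===== PORT B =====
def brute_triple_alt : List String → List (List String × List String)
  | [] => [([], [])]
  | first :: rest =>
    (PySem.List.pyRange 0 3 1).flatMap (fun choice =>
      (brute_triple_alt rest).map (fun b =>
        if choice = 0 then (first :: b.1, b.2)
        else if choice = 1 then (b.1, first :: b.2)
        else b))

-- ===== PRECONDITION & SPEC =====
def Spec_brute_triple (items : List String) (out : List (List String × List String)) : Prop := out = brute_triple_alt items
instance (items : List String) (out : List (List String × List String)) : Decidable (Spec_brute_triple items out) := by unfold Spec_brute_triple; infer_instance

-- ===== CLAIM (what is proved, stated in full; the proofs are below) =====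
def Claim_equal_brute_triple : Prop := ∀ (items : List String), Dom_brute_triple items → Spec_brute_triple items (brute_triple items)

-- ===== LEMMAS AND PROOFS =====

-- ternary digit character
def dchar (m : Nat) : Char := if m = 0 then '0' else if m = 1 then '1' else '2'

-- to_ternary on Nat inputs, in the Nat world
def ternRepr (m : Nat) : List Char :=
  if m < 3 then [dchar m] else ternRepr (m / 3) ++ [dchar (m % 3)]

-- zero-padded base-3 digit string of m, width w, most significant first
def digs : Nat → Nat → List Char
  | 0, _ => []
  | w + 1, m => digs w (m / 3) ++ [dchar (m % 3)]

-- routing: digit '0' → bag1, '1' → bag2, else discard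
def route : List Char → List String → List String × List String
  | c :: cs, x :: xs =>
      let p := route cs xs
      if c = '0' then (x :: p.1, p.2) else if c = '1' then (p.1, x :: p.2) else p
  | _, _ => ([], [])

theorem toChars_small (m : Nat) (h : m < 3) : PySem.Int.toChars (m : Int) = [dchar m] := by
  interval_cases m <;> decide

theorem ternRepr_lt (m : Nat) (h : m < 3) : ternRepr m = [dchar m] := by
  conv_lhs => rw [ternRepr]
  rw [if_pos h]

theorem ternRepr_ge (m : Nat) (h : ¬ m < 3) : ternRepr m = ternRepr (m / 3) ++ [dchar (m % 3)] := by
  conv_lhs => rw [ternRepr]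
  rw [if_neg h]

theorem to_ternary_natCast (m : Nat) : to_ternary (m : Int) = ternRepr m := by
  induction m using Nat.strong_induction_on with
  | _ m ih =>
    rw [to_ternary]
    by_cases h : m < 3
    · rw [if_pos (by exact_mod_cast h), ternRepr_lt m h, toChars_small m h]
    · rw [if_neg (by exact_mod_cast h), ternRepr_ge m h]
      have hfd : PySem.Int.floordiv (m : Int) 3 = ((m / 3 : Nat) : Int) := by
        exact_mod_cast PySem.Int.floordiv_natCast m 3
      have hmd : PySem.Int.mod (m : Int) 3 = ((m % 3 : Nat) : Int) := by
        exact_mod_cast PySem.Int.mod_natCast m 3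
      rw [hfd, hmd, ih (m / 3) (by omega), toChars_small (m % 3) (by omega)]

theorem digs_zero (w : Nat) : digs w 0 = List.replicate w '0' := by
  induction w with
  | zero => rfl
  | succ w ih => simp [digs, ih, dchar, List.replicate_succ']

theorem pad_eq_digs (w m : Nat) (hw : 1 ≤ w) (hm : m < 3 ^ w) :
    List.replicate (w - (ternRepr m).length) '0' ++ ternRepr m = digs w m := by
  induction w generalizing m with
  | zero => omega
  | succ w ih =>
    by_cases h : m < 3
    · rw [ternRepr_lt m h]
      have h3 : m / 3 = 0 := by omega
      have h4 : m % 3 = m := by omega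
      simp [digs, h3, h4, digs_zero]
    · rw [ternRepr_ge m h]
      have hw1 : 1 ≤ w := by
        by_contra hc
        have : w = 0 := by omega
        subst this; simp at hm; omega
      have hdiv : m / 3 < 3 ^ w := by
        have : 3 ^ (w + 1) = 3 * 3 ^ w := by ring
        omega
      have hIH := ih (m / 3) hw1 hdiv
      simp only [List.length_append, List.length_singleton]
      have hlen : w + 1 - ((ternRepr (m / 3)).length + 1) = w - (ternRepr (m / 3)).length := by
        omega
      rw [hlen, digs, ← List.append_assoc, hIH]

theorem digs_split (w c r : Nat) (hc : c < 3) (hr : r < 3 ^ w) :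
    digs (w + 1) (c * 3 ^ w + r) = dchar c :: digs w r := by
  induction w generalizing c r with
  | zero =>
    have : r = 0 := by omega
    subst this
    simp [digs, Nat.mod_eq_of_lt hc]
  | succ w ih =>
    have h3 : 3 ^ (w + 1) = 3 * 3 ^ w := by ring
    have ht : c * 3 ^ (w + 1) = 3 * (c * 3 ^ w) := by rw [h3]; ring
    have hdiv : (c * 3 ^ (w + 1) + r) / 3 = c * 3 ^ w + r / 3 := by omega
    have hmod : (c * 3 ^ (w + 1) + r) % 3 = r % 3 := by omega
    rw [show w + 1 + 1 = (w + 1) + 1 from rfl, digs, hdiv, hmod,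
        ih c (r / 3) hc (by omega), show (w:Nat) + 1 = w + 1 from rfl, digs]
    rfl

theorem digs_length (w m : Nat) : (digs w m).length = w := by
  induction w generalizing m with
  | zero => rfl
  | succ w ih => simp [digs, ih]

-- A's inner index loop equals `route`, for equal-length mask/items, with accumulators.
theorem fold_route (xs : List String) (cs : List Char) (acc : List String × List String)
    (h : cs.length = xs.length) :
    (List.range xs.length).foldl
      (fun (b : List String × List String) (k : Nat) =>
        if PySem.List.pyGetD cs (k : Int) ' ' = '0' then (b.1 ++ [PySem.List.pyGetD xs (k : Int) ""], b.2)
        else if PySem.List.pyGetD cs (k : Int) ' ' = '1' then (b.1, b.2 ++ [PySem.List.pyGetD xs (k : Int) ""])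
        else b)
      acc = (acc.1 ++ (route cs xs).1, acc.2 ++ (route cs xs).2) := by
  induction xs generalizing cs acc with
  | nil =>
    cases cs with
    | nil => simp [route]
    | cons c cs => simp at h
  | cons x xs ih =>
    cases cs with
    | nil => simp at h
    | cons c cs =>
      rw [List.length_cons, List.range_succ_eq_map, List.foldl_cons, List.foldl_map]
      simp only [PySem.List.pyGetD_natCast, List.getD_cons_zero, List.getD_cons_succ]
      by_cases h0 : c = '0'
      · rw [if_pos h0]
        have ih' := ih cs (acc.1 ++ [x], acc.2) (by simpa using h)
        simp only [PySem.List.pyGetD_natCast] at ih'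
        rw [ih']
        simp [route, h0]
      · by_cases h1 : c = '1'
        · rw [if_neg h0, if_pos h1]
          have ih' := ih cs (acc.1, acc.2 ++ [x]) (by simpa using h)
          simp only [PySem.List.pyGetD_natCast] at ih'
          rw [ih']
          simp [route, h1]
        · rw [if_neg h0, if_neg h1]
          have ih' := ih cs acc (by simpa using h)
          simp only [PySem.List.pyGetD_natCast] at ih'
          rw [ih']
          simp [route, h0, h1]

-- A characterized: map route ∘ digs over range
theorem brute_triple_eq_map (items : List String) :
    brute_triple items =
      (List.range (3 ^ items.length)).map (fun m => route (digs items.length m) items) := by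
  cases items with
  | nil => decide
  | cons x xs =>
    rw [brute_triple]
    rw [PySem.List.pyRange_one 0 (3 ^ (x :: xs).length),
        PySem.List.pyRange_one 0 ((x :: xs).length : Int)]
    have h3 : ((3 ^ (x :: xs).length : Int) - 0).toNat = 3 ^ (x :: xs).length := by
      have hc : (3 : Int) ^ (x :: xs).length = ((3 ^ (x :: xs).length : Nat) : Int) := by
        push_cast; ring
      rw [sub_zero, hc, Int.toNat_natCast]
    have hl : (((x :: xs).length : Int) - 0).toNat = (x :: xs).length := by omega
    rw [h3, hl, List.map_map]
    apply List.map_congr_left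
    intro m hm
    rw [List.mem_range] at hm
    simp only [Function.comp_apply, zero_add]
    rw [to_ternary_natCast m]
    have hmask := pad_eq_digs (x :: xs).length m (by simp) (by exact_mod_cast hm)
    rw [hmask, List.foldl_map]
    rw [fold_route (x :: xs) (digs (x :: xs).length m) ([], []) (digs_length _ _)]
    rfl

theorem map_eq_alt (items : List String) :
    (List.range (3 ^ items.length)).map (fun m => route (digs items.length m) items) =
      brute_triple_alt items := by
  induction items with
  | nil => decide
  | cons x xs ih =>
    have hsplit : 3 ^ (x :: xs).length = 3 ^ xs.length + (3 ^ xs.length + 3 ^ xs.length) := by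
      simp [List.length_cons, pow_succ]; ring
    rw [hsplit]
    simp only [List.range_add, List.map_append, List.map_map]
    have hch : ∀ c : Nat, c < 3 → ∀ m : Nat, m ∈ List.range (3 ^ xs.length) →
        route (digs (x :: xs).length (c * 3 ^ xs.length + m)) (x :: xs) =
          (fun b : List String × List String =>
            if c = 0 then (x :: b.1, b.2) else if c = 1 then (b.1, x :: b.2) else b)
            (route (digs xs.length m) xs) := by
      intro c hc m hm
      rw [List.mem_range] at hm
      rw [List.length_cons, digs_split xs.length c m hc hm, route]
      rcases (by omega : c = 0 ∨ c = 1 ∨ c = 2) with h | h | h <;> subst h <;> simp [dchar]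
    have h0 := hch 0 (by omega)
    have h1 := hch 1 (by omega)
    have h2 := hch 2 (by omega)
    rw [brute_triple_alt]
    have hpy : PySem.List.pyRange 0 3 1 = [0, 1, 2] := by decide
    rw [hpy]
    simp only [List.flatMap_cons, List.flatMap_nil, List.append_nil, List.map_map, ← ih]
    congr 1
    · apply List.map_congr_left
      intro m hm
      have := h0 m hm
      simpa using this
    congr 1
    · apply List.map_congr_left
      intro m hm
      have := h1 m hm
      simp only [Function.comp_apply] at this ⊢
      rw [show (1 : Nat) * 3 ^ xs.length + m = 3 ^ xs.length + m by ring] at this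
      simpa using this
    · apply List.map_congr_left
      intro m hm
      have := h2 m hm
      simp only [Function.comp_apply] at this ⊢
      rw [show (2 : Nat) * 3 ^ xs.length + m = 3 ^ xs.length + (3 ^ xs.length + m) by ring] at this
      simpa using this

-- ===== VERDICT (by name: the statement is the Claim_ definition above) =====
theorem brute_triple_spec : Claim_equal_brute_triple := by
  intro items _
  unfold Spec_brute_triple
  rw [brute_triple_eq_map, map_eq_alt]
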